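-- pv_equiv track=rewrite | github.com/Kaden-G/LangGraph_3_Easy_Steps | PythonExerciseFiles/04_rag_pipeline.py | simple_retriever
-- ===== SOURCE A (Python) =====
-- DOCUMENT_STORE = [
--     {
--         "id": "doc-001",
--         "content": "LangGraph is a framework for building stateful, multi-agent applications with LLMs. "
--         "It extends LangChain with directed graph orchestration, allowing developers to define "
--         "complex workflows where multiple AI agents collaborate through shared state.",
--         "source": "langgraph-docs",
--     },
--     {
--         "id": "doc-002",
--         "content": "State reducers in LangGraph allow multiple nodes to accumulate data in shared state "
--         "fields. Using Python's Annotated type with operator.add, list fields append rather than "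
--         "overwrite, enabling multi-agent collaboration without data loss.",
--         "source": "langgraph-advanced-guide",
--     },
--     {
--         "id": "doc-003",
--         "content": "LangGraph checkpointing saves state snapshots at every node transition. This enables "
--         "pause/resume workflows, human-in-the-loop patterns, and full audit trails. Production "
--         "deployments typically use PostgresSaver for persistent checkpointing.",
--         "source": "langgraph-checkpointing-guide",
--     },
--     {
--         "id": "doc-004",
--         "content": "The OWASP Top 10 for LLM Applications identifies key risks including prompt injection, "
--         "insecure output handling, and training data poisoning. Mitigation strategies include "
--         "input validation, output filtering, and human oversight gates.",
--         "source": "owasp-llm-top10",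
--     },
--     {
--         "id": "doc-005",
--         "content": "The supervisor-worker pattern in LangGraph uses one LLM agent to route tasks to "
--         "specialist agents. The supervisor reads the full conversation state and decides which "
--         "worker should act next, enabling dynamic multi-step workflows.",
--         "source": "langgraph-patterns",
--     },
--     {
--         "id": "doc-006",
--         "content": "Retrieval-Augmented Generation (RAG) grounds LLM responses in external knowledge by "
--         "retrieving relevant documents before generating answers. This reduces hallucination and "
--         "enables the LLM to reference authoritative sources.",
--         "source": "rag-overview",
--     },
--     {
--         "id": "doc-007",
--         "content": "The best recipe for chocolate chip cookies involves creaming butter and sugar, "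
--         "then folding in flour and chocolate chips. Bake at 375F for 12 minutes.",
--         "source": "cooking-blog",
--     },
-- ]
--
-- def simple_retriever(query: str, top_k: int = 3) -> list[dict]:
--     """
--     Dead-simple keyword retriever.
--     In production, replace with: vector_store.similarity_search(query, k=top_k)
--     The interface stays the same: query in, list of docs out.
--     """
--     query_words = set(query.lower().split())
--     scored = []
--     for doc in DOCUMENT_STORE:
--         content_words = set(doc["content"].lower().split())
--         overlap = len(query_words & content_words)
--         scored.append((overlap, doc))
--     scored.sort(key=lambda x: x[0], reverse=True)
--     return [doc for _, doc in scored[:top_k]]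
-- ===== SOURCE B (Python) =====
-- DOCUMENT_STORE = [
--     {
--         "id": "doc-001",
--         "content": "LangGraph is a framework for building stateful, multi-agent applications with LLMs. "
--         "It extends LangChain with directed graph orchestration, allowing developers to define "
--         "complex workflows where multiple AI agents collaborate through shared state.",
--         "source": "langgraph-docs",
--     },
--     {
--         "id": "doc-002",
--         "content": "State reducers in LangGraph allow multiple nodes to accumulate data in shared state "
--         "fields. Using Python's Annotated type with operator.add, list fields append rather than "
--         "overwrite, enabling multi-agent collaboration without data loss.",
--         "source": "langgraph-advanced-guide",
--     },
--     {
--         "id": "doc-003",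
--         "content": "LangGraph checkpointing saves state snapshots at every node transition. This enables "
--         "pause/resume workflows, human-in-the-loop patterns, and full audit trails. Production "
--         "deployments typically use PostgresSaver for persistent checkpointing.",
--         "source": "langgraph-checkpointing-guide",
--     },
--     {
--         "id": "doc-004",
--         "content": "The OWASP Top 10 for LLM Applications identifies key risks including prompt injection, "
--         "insecure output handling, and training data poisoning. Mitigation strategies include "
--         "input validation, output filtering, and human oversight gates.",
--         "source": "owasp-llm-top10",
--     },
--     {
--         "id": "doc-005",
--         "content": "The supervisor-worker pattern in LangGraph uses one LLM agent to route tasks to "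
--         "specialist agents. The supervisor reads the full conversation state and decides which "
--         "worker should act next, enabling dynamic multi-step workflows.",
--         "source": "langgraph-patterns",
--     },
--     {
--         "id": "doc-006",
--         "content": "Retrieval-Augmented Generation (RAG) grounds LLM responses in external knowledge by "
--         "retrieving relevant documents before generating answers. This reduces hallucination and "
--         "enables the LLM to reference authoritative sources.",
--         "source": "rag-overview",
--     },
--     {
--         "id": "doc-007",
--         "content": "The best recipe for chocolate chip cookies involves creaming butter and sugar, "
--         "then folding in flour and chocolate chips. Bake at 375F for 12 minutes.",
--         "source": "cooking-blog",
--     },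
-- ]
--
-- def simple_retriever(query: str, top_k: int = 3) -> list[dict]:
--     """Bucket (counting-sort) variant: no comparison sort at all.
--
--     Docs are grouped into buckets by overlap score; concatenating the
--     buckets from the highest score down reproduces the stable descending
--     order, and the usual slice keeps the top_k of them.
--     """
--     query_words = set(query.lower().split())
--     buckets: dict[int, list[dict]] = {}
--     best = 0
--     for doc in DOCUMENT_STORE:
--         score = len(query_words & set(doc["content"].lower().split()))
--         buckets.setdefault(score, []).append(doc)
--         if score > best:
--             best = score
--     ordered = []
--     for s in range(best, -1, -1):
--         ordered.extend(buckets.get(s, []))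
--     return ordered[:top_k]
-- ===== Notes on version B (the rewrite author's own statement) =====
-- stated objective: alternative
-- what changed: Replaces A's sort-everything-then-slice pipeline by a counting-sort-style bucket grouping: one pass puts each doc in a bucket keyed by its overlap score (tracking the best score), and concatenating buckets from the best score down reproduces the stable descending order before the same slice.
import Mathlib
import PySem

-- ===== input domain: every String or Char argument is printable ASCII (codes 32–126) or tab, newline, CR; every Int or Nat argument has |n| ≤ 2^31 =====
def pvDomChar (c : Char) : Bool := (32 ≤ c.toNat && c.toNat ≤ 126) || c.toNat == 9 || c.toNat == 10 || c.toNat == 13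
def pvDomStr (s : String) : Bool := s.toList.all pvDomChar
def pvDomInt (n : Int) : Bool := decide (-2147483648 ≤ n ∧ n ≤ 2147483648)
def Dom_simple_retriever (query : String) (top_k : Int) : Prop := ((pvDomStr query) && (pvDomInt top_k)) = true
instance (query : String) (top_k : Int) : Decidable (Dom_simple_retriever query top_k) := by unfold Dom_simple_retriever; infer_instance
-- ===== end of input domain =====

-- B replaces A's full stable sort of the scored list by score buckets concatenated from the
-- highest score down (a counting-sort-style selection); same return value on every input.

-- The fixed module-level DOCUMENT_STORE (each dict ported as an association list in key order).
def pvStore : List (List (String × String)) :=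
  [   [("id", "doc-001"), ("content",
    "LangGraph is a framework for building stateful, multi-agent applications with LLMs. It extends LangChain with directed graph orchestration, allowing developers to define complex workflows where multiple AI agents collaborate through shared state."), ("source", "langgraph-docs")],
   [("id", "doc-002"), ("content",
    "State reducers in LangGraph allow multiple nodes to accumulate data in shared state fields. Using Python's Annotated type with operator.add, list fields append rather than overwrite, enabling multi-agent collaboration without data loss."), ("source", "langgraph-advanced-guide")],
   [("id", "doc-003"), ("content",
    "LangGraph checkpointing saves state snapshots at every node transition. This enables pause/resume workflows, human-in-the-loop patterns, and full audit trails. Production deployments typically use PostgresSaver for persistent checkpointing."), ("source", "langgraph-checkpointing-guide")],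
   [("id", "doc-004"), ("content",
    "The OWASP Top 10 for LLM Applications identifies key risks including prompt injection, insecure output handling, and training data poisoning. Mitigation strategies include input validation, output filtering, and human oversight gates."), ("source", "owasp-llm-top10")],
   [("id", "doc-005"), ("content",
    "The supervisor-worker pattern in LangGraph uses one LLM agent to route tasks to specialist agents. The supervisor reads the full conversation state and decides which worker should act next, enabling dynamic multi-step workflows."), ("source", "langgraph-patterns")],
   [("id", "doc-006"), ("content",
    "Retrieval-Augmented Generation (RAG) grounds LLM responses in external knowledge by retrieving relevant documents before generating answers. This reduces hallucination and enables the LLM to reference authoritative sources."), ("source", "rag-overview")],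
   [("id", "doc-007"), ("content",
    "The best recipe for chocolate chip cookies involves creaming butter and sugar, then folding in flour and chocolate chips. Bake at 375F for 12 minutes."), ("source", "cooking-blog")]]

-- doc["content"] for a doc of the literal store: the key "content" is always present, so the
-- defaulted lookup is exact (KeyError is unreachable).
def pvScore (query_words : PySem.Set String) (doc : List (String × String)) : Int :=
  PySem.List.len (PySem.Set.inter query_words
    (PySem.Set.ofList (PySem.Str.split₀ (PySem.Str.lower
      (PySem.Dict.getD (PySem.Dict.mk doc) "content" "")))))

-- ===== PORT A =====
def simple_retriever (query : String) (top_k : Int) : List (List (String × String)) :=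
  let query_words := PySem.Set.ofList (PySem.Str.split₀ (PySem.Str.lower query))
  let scored : List (Int × List (String × String)) :=
    pvStore.foldl (fun scored doc => scored ++ [(pvScore query_words doc, doc)]) []
  let scored := PySem.List.sorted scored (fun x => x.1) true
  (PySem.List.slice scored none (some top_k)).map (fun x => x.2)

-- ===== PORT B =====
-- buckets.setdefault(score, []).append(doc) is ported as Dict.modify score [] (· ++ [doc]):
-- both set buckets[score] = buckets.get(score, []) + [doc] (appending fresh keys in place).
def simple_retriever_alt (query : String) (top_k : Int) : List (List (String × String)) :=
  let query_words := PySem.Set.ofList (PySem.Str.split₀ (PySem.Str.lower query))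
  let st := pvStore.foldl
    (fun (st : PySem.Dict Int (List (List (String × String))) × Int) doc =>
      let score := pvScore query_words doc
      (st.1.modify score [] (· ++ [doc]), if st.2 < score then score else st.2))
    (PySem.Dict.empty, 0)
  let ordered := (PySem.List.pyRange st.2 (-1) (-1)).foldl
    (fun acc s => acc ++ st.1.getD s []) []
  PySem.List.slice ordered none (some top_k)

-- ===== PRECONDITION & SPEC =====
def Spec_simple_retriever (query : String) (top_k : Int) (out : List (List (String × String))) : Prop := out = simple_retriever_alt query top_k
instance (query : String) (top_k : Int) (out : List (List (String × String))) : Decidable (Spec_simple_retriever query top_k out) := by unfold Spec_simple_retriever; infer_instance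

-- ===== CLAIM (what is proved, stated in full; the proofs are below) =====
def Claim_equal_simple_retriever : Prop := ∀ (query : String) (top_k : Int), Dom_simple_retriever query top_k → Spec_simple_retriever query top_k (simple_retriever query top_k)

-- ===== LEMMAS AND PROOFS =====

-- map commutes with a Python prefix slice xs[:b] (any b, including negative).
theorem pv_map_slice {α β : Type} (f : α → β) (xs : List α) (b : Int) :
    (PySem.List.slice xs none (some b)).map f = PySem.List.slice (xs.map f) none (some b) := by
  simp [PySem.List.slice, List.map_take]

-- insertBy walks past a prefix none of whose elements trigger the insertion.
theorem pv_insertBy_append {α : Type} (before : α → α → Bool) (x : α) (pre ys : List α)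
    (h : ∀ y ∈ pre, before x y = false) :
    PySem.List.insertBy before x (pre ++ ys) = pre ++ PySem.List.insertBy before x ys := by
  induction pre with
  | nil => simp
  | cons y t ih =>
    simp only [List.cons_append, PySem.List.insertBy, h y (by simp)]
    simp only [Bool.false_eq_true, if_false, List.cons.injEq, true_and]
    exact ih (fun z hz => h z (by simp [hz]))

theorem pv_key_of_mem_flatMap {α : Type} (l : List (Int × α)) (ks : List Int) (y : Int × α)
    (hy : y ∈ ks.flatMap (fun s => l.filter (fun p => p.1 == s))) : y.1 ∈ ks := by
  simp only [List.mem_flatMap, List.mem_filter, beq_iff_eq] at hy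
  obtain ⟨s, hs, _, rfl⟩ := hy
  exact hs

-- Inserting x (stable, descending by first component) into the bucket concatenation of l
-- appends x to its own bucket.
theorem pv_insert_flatMap {α : Type} (x : Int × α) (l : List (Int × α)) (ks : List Int)
    (hks : ks.Pairwise (· > ·)) (hx : x.1 ∈ ks) :
    PySem.List.insertBy (fun a b => decide (b.1 < a.1)) x
        (ks.flatMap (fun s => l.filter (fun p => p.1 == s)))
      = ks.flatMap (fun s => (l ++ [x]).filter (fun p => p.1 == s)) := by
  induction ks with
  | nil => cases hx
  | cons s ks' ih =>
    rw [List.pairwise_cons] at hks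
    simp only [List.flatMap_cons]
    by_cases hxs : x.1 = s
    · -- x belongs to the head bucket; every later element has a strictly smaller key
      have htail : ∀ y ∈ ks'.flatMap (fun s => l.filter (fun p => p.1 == s)), y.1 < x.1 := by
        intro y hy
        exact hxs ▸ hks.1 _ (pv_key_of_mem_flatMap l ks' y hy)
      have hbucket : ∀ y ∈ l.filter (fun p => p.1 == s),
          (fun a b => decide (b.1 < a.1)) x y = false := by
        intro y hy
        simp only [List.mem_filter, beq_iff_eq] at hy
        simp only [decide_eq_false_iff_not, hy.2, hxs]
        omega
      rw [pv_insertBy_append _ _ _ _ hbucket]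
      have hfx : (l ++ [x]).filter (fun p => p.1 == s) = l.filter (fun p => p.1 == s) ++ [x] := by
        simp [List.filter_append, hxs]
      have hrest : ks'.flatMap (fun s' => (l ++ [x]).filter (fun p => p.1 == s'))
          = ks'.flatMap (fun s' => l.filter (fun p => p.1 == s')) := by
        apply List.flatMap_congr
        intro s' hs'
        have hne : ¬ (x.1 = s') := by have := hks.1 _ hs'; omega
        simp [List.filter_append, hne]
      rw [hfx, hrest]
      rcases hR : ks'.flatMap (fun s' => l.filter (fun p => p.1 == s')) with _ | ⟨y, R'⟩
      · rw [hR]; simp [PySem.List.insertBy]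
      · have hy : y.1 < x.1 := htail y (by rw [hR]; exact List.mem_cons_self ..)
        rw [hR]; simp [PySem.List.insertBy, hy]
    · have hx' : x.1 ∈ ks' := by
        rcases List.mem_cons.mp hx with h | h
        · exact absurd h hxs
        · exact h
      have hlt : x.1 < s := hks.1 _ hx'
      have hbucket : ∀ y ∈ l.filter (fun p => p.1 == s),
          (fun a b => decide (b.1 < a.1)) x y = false := by
        intro y hy
        simp only [List.mem_filter, beq_iff_eq] at hy
        simp only [decide_eq_false_iff_not, hy.2]
        omega
      rw [pv_insertBy_append _ _ _ _ hbucket, ih hks.2 hx']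
      have hsame : (l ++ [x]).filter (fun p => p.1 == s) = l.filter (fun p => p.1 == s) := by
        simp [List.filter_append, hxs]
      rw [hsame]

theorem pv_sorted_rev_eq_flatMap {α : Type} (l : List (Int × α)) (ks : List Int)
    (hks : ks.Pairwise (· > ·)) (hmem : ∀ p ∈ l, p.1 ∈ ks) :
    PySem.List.sorted l (fun p => p.1) true = ks.flatMap (fun s => l.filter (fun p => p.1 == s)) := by
  rw [PySem.List.sorted_rev_eq_foldl_insertBy]
  induction l using List.reverseRecOn with
  | nil => simp
  | append_singleton t x ih =>
    rw [List.foldl_append, List.foldl_cons, List.foldl_nil,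
      ih (fun p hp => hmem p (by simp [hp]))]
    exact pv_insert_flatMap x t ks hks (hmem x (by simp))


theorem pv_score_nonneg (qw : PySem.Set String) (doc : List (String × String)) :
    0 ≤ pvScore qw doc := by
  simp only [pvScore, PySem.List.len_eq]
  exact Int.natCast_nonneg _

theorem pv_best_eq_max (qw : PySem.Set String) :
    pvStore.foldl (fun b doc => if b < pvScore qw doc then pvScore qw doc else b) 0
      = (pvStore.map (pvScore qw)).foldl max 0 := by
  rw [List.foldl_map]
  apply PySem.List.foldl_congr_mem
  intro b doc _
  rcases lt_or_ge b (pvScore qw doc) with h | h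
  · simp [h, max_eq_right h.le]
  · simp [not_lt.mpr h, max_eq_left h]

theorem pv_bucket (qw : PySem.Set String) (s : Int) :
    (pvStore.foldl (fun d doc => d.modify (pvScore qw doc) [] (· ++ [doc]))
        PySem.Dict.empty).getD s []
      = ((pvStore.map (fun doc => (pvScore qw doc, doc))).filter
          (fun p => p.1 == s)).map (fun p => p.2) := by
  have h := PySem.Dict.getD_foldl_modify_append
    (l := pvStore.map (fun doc => (pvScore qw doc, doc))) (d := PySem.Dict.empty) (c := s)
  rw [List.foldl_map] at h
  simpa using h

theorem pv_core (qw : PySem.Set String) :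
    (PySem.List.sorted (pvStore.map (fun doc => (pvScore qw doc, doc))) (fun x => x.1) true).map
        (fun x => x.2)
      = (PySem.List.pyRange
            (pvStore.foldl (fun b doc => if b < pvScore qw doc then pvScore qw doc else b) 0)
            (-1) (-1)).flatMap
          (fun s => (pvStore.foldl (fun d doc => d.modify (pvScore qw doc) [] (· ++ [doc]))
              PySem.Dict.empty).getD s []) := by
  set best := pvStore.foldl (fun b doc => if b < pvScore qw doc then pvScore qw doc else b) 0
    with hbest
  have hpair : (PySem.List.pyRange best (-1) (-1)).Pairwise (· > ·) := by
    rw [PySem.List.pyRange_neg_one_eq_reverse, List.pairwise_reverse]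
    exact PySem.List.pairwise_lt_pyRange_one _ _
  have hmem : ∀ p ∈ pvStore.map (fun doc => (pvScore qw doc, doc)),
      p.1 ∈ PySem.List.pyRange best (-1) (-1) := by
    intro p hp
    rcases List.mem_map.mp hp with ⟨doc, hdoc, rfl⟩
    rw [PySem.List.mem_pyRange_neg_one]
    constructor
    · have := pv_score_nonneg qw doc; omega
    · rw [hbest, pv_best_eq_max]
      exact (PySem.List.le_foldl_max _ _).2 _ (List.mem_map.mpr ⟨doc, hdoc, rfl⟩)
  rw [pv_sorted_rev_eq_flatMap _ _ hpair hmem, List.map_flatMap]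
  apply List.flatMap_congr
  intro s _
  exact (pv_bucket qw s).symm

-- ===== VERDICT (by name: the statement is the Claim_ definition above) =====
set_option maxHeartbeats 1600000 in
theorem simple_retriever_spec : Claim_equal_simple_retriever := by
  intro query top_k _
  simp only [Spec_simple_retriever, simple_retriever, simple_retriever_alt]
  set qw := PySem.Set.ofList (PySem.Str.split₀ (PySem.Str.lower query)) with hqw
  rw [PySem.List.foldl_append_singleton_eq_map (f := fun doc => (pvScore qw doc, doc))]
  have hsplit : List.foldl (fun (st : PySem.Dict Int (List (List (String × String))) × Int) doc =>
        (st.1.modify (pvScore qw doc) [] (· ++ [doc]),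
          if st.2 < pvScore qw doc then pvScore qw doc else st.2))
      (PySem.Dict.empty, 0) pvStore
      = (List.foldl (fun d doc => d.modify (pvScore qw doc) [] (· ++ [doc])) PySem.Dict.empty pvStore,
         List.foldl (fun b doc => if b < pvScore qw doc then pvScore qw doc else b) 0 pvStore) :=
    PySem.List.foldl_prod_mk (fun d doc => d.modify (pvScore qw doc) [] (· ++ [doc]))
      (fun b doc => if b < pvScore qw doc then pvScore qw doc else b) pvStore PySem.Dict.empty 0
  rw [hsplit, PySem.List.foldl_append_eq_flatMap, List.nil_append, List.nil_append, pv_map_slice]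
  dsimp only
  rw [pv_core qw]
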